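-- pv_equiv track=rewrite | github.com/kindqlow/path_finding_with_safe | Path-Finding-Visualisation-with-Pygame-master/GWO_TSP.py | calculate_SS
-- ===== SOURCE A (Python) =====
-- def calculate_SS(S1, S2):
--
--     # Cách tính 1
--     SS = []
--     n = len(S1)
--     for count in range(n):
--         for i in range(n):
--             if S1[i] == S2[count] and i != count and [i, count] not in SS:
--                 SS.append([i, count])
--     # SS.sort(key=lambda x: x[1], reverse=False)
--     return SS
-- ===== SOURCE B (Python) =====
-- def calculate_SS(S1, S2):
--     index = {}
--     for i, v in enumerate(S1):
--         index.setdefault(v, []).append(i)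
--     SS = []
--     for count in range(len(S1)):
--         for i in index.get(S2[count], []):
--             if i != count:
--                 SS.append([i, count])
--     return SS
-- ===== Notes on version B (the rewrite author's own statement) =====
-- stated objective: faster
-- what changed: B builds a value-to-indices dictionary over S1 once and for each count looks up S2[count] in it, replacing A's full inner scan and its linear 'not in SS' membership test with direct index lookups.
import Mathlib
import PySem

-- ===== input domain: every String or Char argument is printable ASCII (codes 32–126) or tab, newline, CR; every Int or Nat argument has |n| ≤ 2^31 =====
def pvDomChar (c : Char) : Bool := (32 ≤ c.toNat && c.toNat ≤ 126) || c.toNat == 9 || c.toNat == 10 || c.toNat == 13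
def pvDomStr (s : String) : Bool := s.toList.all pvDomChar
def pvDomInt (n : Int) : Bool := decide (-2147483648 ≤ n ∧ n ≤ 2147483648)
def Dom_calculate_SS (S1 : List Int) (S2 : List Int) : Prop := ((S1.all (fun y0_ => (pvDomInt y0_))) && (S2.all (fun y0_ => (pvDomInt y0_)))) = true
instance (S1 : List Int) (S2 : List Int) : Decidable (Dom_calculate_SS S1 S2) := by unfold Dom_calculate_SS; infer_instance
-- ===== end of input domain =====

-- B replaces A's quadratic scan (with a linear 'not in SS' check) by a value→indices
-- dictionary built once over S1 and looked up per count: same output, asymptotically faster.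


-- ===== PORT A =====
def calculate_SS (S1 : List Int) (S2 : List Int) : List (List Int) :=
  (PySem.List.pyRange 0 (S1.length : Int) 1).foldl (fun SS count =>
    (PySem.List.pyRange 0 (S1.length : Int) 1).foldl (fun SS i =>
      if PySem.List.pyGet? S1 i = PySem.List.pyGet? S2 count ∧ i ≠ count ∧ [i, count] ∉ SS
      then SS ++ [[i, count]] else SS) SS) []

-- ===== PORT B =====
-- index: dict mapping each value of S1 to the increasing list of its indices
def pvIndex (S1 : List Int) : PySem.Dict Int (List Int) :=
  (PySem.List.enumerate S1 0).foldl
    (fun d p => d.insert p.2 (d.getD p.2 [] ++ [p.1])) PySem.Dict.empty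

def calculate_SS_alt (S1 : List Int) (S2 : List Int) : List (List Int) :=
  (PySem.List.pyRange 0 (S1.length : Int) 1).foldl (fun SS count =>
    ((pvIndex S1).getD (PySem.List.pyGetD S2 count 0) []).foldl (fun SS i =>
      if i ≠ count then SS ++ [[i, count]] else SS) SS) []

-- ===== PRECONDITION & SPEC =====
-- Pre_ excludes exactly the inputs with len(S1) > len(S2), on which A (and B) raise IndexError at S2[count].
def Pre_calculate_SS (S1 : List Int) (S2 : List Int) : Prop := S1.length ≤ S2.length
instance (S1 : List Int) (S2 : List Int) : Decidable (Pre_calculate_SS S1 S2) := by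
  unfold Pre_calculate_SS; infer_instance
def pvWitness_calculate_SS : List Int × List Int := ([1, 2, 1], [1, 1, 2])
def Spec_calculate_SS (S1 : List Int) (S2 : List Int) (out : List (List Int)) : Prop := out = calculate_SS_alt S1 S2
instance (S1 : List Int) (S2 : List Int) (out : List (List Int)) : Decidable (Spec_calculate_SS S1 S2 out) := by unfold Spec_calculate_SS; infer_instance

-- ===== CLAIM (what is proved, stated in full; the proofs are below) =====
def Claim_equal_calculate_SS : Prop := ∀ (S1 : List Int) (S2 : List Int), Dom_calculate_SS S1 S2 → Pre_calculate_SS S1 S2 → Spec_calculate_SS S1 S2 (calculate_SS S1 S2)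

-- ===== LEMMAS AND PROOFS =====

-- the common value of one 'count' row
def pvRow (S1 S2 : List Int) (c : Int) : List (List Int) :=
  ((PySem.List.pyRange 0 (S1.length : Int) 1).filter
    (fun i => decide (PySem.List.pyGet? S1 i = PySem.List.pyGet? S2 c ∧ i ≠ c))).map
    (fun i => [i, c])

-- A's inner loop: the 'not in SS' test never fires when acc avoids the current row's pairs
theorem pvA_inner (S1 S2 : List Int) (c : Int) :
    ∀ (l : List Int) (acc : List (List Int)), l.Nodup → (∀ i ∈ l, [i, c] ∉ acc) →
    l.foldl (fun SS i =>
      if PySem.List.pyGet? S1 i = PySem.List.pyGet? S2 c ∧ i ≠ c ∧ [i, c] ∉ SS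
      then SS ++ [[i, c]] else SS) acc
    = acc ++ ((l.filter (fun i => decide (PySem.List.pyGet? S1 i = PySem.List.pyGet? S2 c ∧ i ≠ c))).map (fun i => [i, c])) := by
  intro l
  induction l with
  | nil => intro acc _ _; simp
  | cons x l ih =>
      intro acc hnd hmem
      have hx : [x, c] ∉ acc := hmem x (by simp)
      rw [List.nodup_cons] at hnd
      by_cases hcond : PySem.List.pyGet? S1 x = PySem.List.pyGet? S2 c ∧ x ≠ c
      · have hp : PySem.List.pyGet? S1 x = PySem.List.pyGet? S2 c ∧ x ≠ c ∧ [x, c] ∉ acc :=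
          ⟨hcond.1, hcond.2, hx⟩
        rw [List.foldl_cons, if_pos hp,
          ih (acc ++ [[x, c]]) hnd.2 ?side]
        · simp [hcond]
        case side =>
          intro i hi
          simp only [List.mem_append, List.mem_singleton, not_or]
          refine ⟨hmem i (by simp [hi]), fun heq => ?_⟩
          have : i = x := by simpa using heq
          exact hnd.1 (this ▸ hi)
      · have hp : ¬ (PySem.List.pyGet? S1 x = PySem.List.pyGet? S2 c ∧ x ≠ c ∧ [x, c] ∉ acc) := by
          tauto
        rw [List.foldl_cons, if_neg hp, ih acc hnd.2 (fun i hi => hmem i (by simp [hi]))]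
        simp [hcond]

-- A's outer loop accumulates the rows for counts 0..m-1
theorem pvA_outer (S1 S2 : List Int) :
    ∀ (m : Nat),
    (PySem.List.pyRange 0 (m : Int) 1).foldl (fun SS count =>
      (PySem.List.pyRange 0 (S1.length : Int) 1).foldl (fun SS i =>
        if PySem.List.pyGet? S1 i = PySem.List.pyGet? S2 count ∧ i ≠ count ∧ [i, count] ∉ SS
        then SS ++ [[i, count]] else SS) SS) []
    = (PySem.List.pyRange 0 (m : Int) 1).flatMap (pvRow S1 S2) := by
  intro m
  induction m with
  | zero => simp [PySem.List.pyRange_one_eq_nil]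
  | succ m ih =>
      have hsplit : PySem.List.pyRange 0 ((m : Int) + 1) 1
          = PySem.List.pyRange 0 (m : Int) 1 ++ [(m : Int)] :=
        PySem.List.pyRange_one_succ_right (by exact_mod_cast Nat.zero_le m)
      push_cast
      rw [hsplit, List.foldl_append, ih, List.flatMap_append]
      simp only [List.foldl_cons, List.foldl_nil, List.flatMap_cons, List.flatMap_nil, List.append_nil]
      rw [pvA_inner S1 S2 (m : Int) _ _ (PySem.List.nodup_pyRange_one 0 _) ?fresh]
      case fresh =>
        intro i _ hin
        rw [List.mem_flatMap] at hin
        obtain ⟨c, hc, hrow⟩ := hin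
        have hcm : (m : Int) = c := by
          simp only [pvRow, List.mem_map, List.mem_filter] at hrow
          obtain ⟨k, _, hk⟩ := hrow
          simpa using congrArg (fun t => t.getD 1 0) hk.symm
        rw [PySem.List.mem_pyRange_one] at hc
        omega
      rfl

-- the index dict groups the indices of each value, in increasing order
theorem pvIndex_getD (v : Int) :
    ∀ (xs : List Int) (s : Int) (d : PySem.Dict Int (List Int)),
    ((PySem.List.enumerate xs s).foldl
      (fun d p => d.insert p.2 (d.getD p.2 [] ++ [p.1])) d).getD v []
    = d.getD v [] ++ ((PySem.List.enumerate xs s).filter (fun p => p.2 == v)).map (fun p => p.1) := by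
  intro xs
  induction xs with
  | nil => intro s d; simp [PySem.List.enumerate_nil]
  | cons x xs ih =>
      intro s d
      rw [PySem.List.enumerate_cons]
      simp only [List.foldl_cons, List.filter_cons]
      rw [ih]
      by_cases hv : x = v
      · subst hv
        simp
      · have hbv : (x == v) = false := by simpa using hv
        simp [PySem.Dict.getD_insert, Ne.symm hv, hbv]

-- B's per-count step equals pvRow, under the bounds 0 ≤ c < len S1 ≤ len S2
theorem pvB_row (S1 S2 : List Int) (hlen : S1.length ≤ S2.length) (c : Int)
    (hc0 : 0 ≤ c) (hcn : c < (S1.length : Int)) (acc : List (List Int)) :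
    ((pvIndex S1).getD (PySem.List.pyGetD S2 c 0) []).foldl (fun SS i =>
      if i ≠ c then SS ++ [[i, c]] else SS) acc
    = acc ++ pvRow S1 S2 c := by
  have hidx : (pvIndex S1).getD (PySem.List.pyGetD S2 c 0) []
      = ((PySem.List.pyRange 0 (S1.length : Int) 1).filter
          (fun j => PySem.List.pyGetD S1 j 0 == PySem.List.pyGetD S2 c 0)) := by
    unfold pvIndex
    rw [pvIndex_getD, PySem.Dict.getD_empty, PySem.List.enumerate_eq_map_pyRange S1 0,
      List.filter_map, List.map_map]
    simp [Function.comp_def, PySem.List.len_eq]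
  rw [hidx, PySem.List.foldl_append_ite (p := fun i => i ≠ c) (f := fun i => [i, c]),
    List.filter_filter]
  congr 1
  rw [pvRow]
  congr 1
  apply List.filter_congr
  intro j hj
  rw [PySem.List.mem_pyRange_one] at hj
  have hj1 : PySem.List.pyGet? S1 j = some (PySem.List.pyGetD S1 j 0) := by
    rw [PySem.List.pyGet?_eq_some_getElem S1 hj.1 hj.2,
      PySem.List.pyGetD_eq_getElem S1 0 hj.1 hj.2]
  have hc2 : c < (S2.length : Int) := by
    have : (S1.length : Int) ≤ (S2.length : Int) := by exact_mod_cast hlen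
    omega
  have hj2 : PySem.List.pyGet? S2 c = some (PySem.List.pyGetD S2 c 0) := by
    rw [PySem.List.pyGet?_eq_some_getElem S2 hc0 hc2,
      PySem.List.pyGetD_eq_getElem S2 0 hc0 hc2]
  simp [hj1, hj2, Bool.and_comm, beq_eq_decide]

-- ===== VERDICT (by name: the statement is the Claim_ definition above) =====
theorem calculate_SS_spec : Claim_equal_calculate_SS := by
  intro S1 S2 _ hpre
  unfold Spec_calculate_SS calculate_SS calculate_SS_alt
  rw [pvA_outer S1 S2 S1.length]
  have hstep : ∀ (acc : List (List Int)), ∀ c ∈ PySem.List.pyRange 0 (S1.length : Int) 1,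
      (((pvIndex S1).getD (PySem.List.pyGetD S2 c 0) []).foldl
        (fun SS i => if i ≠ c then SS ++ [[i, c]] else SS) acc) = acc ++ pvRow S1 S2 c := by
    intro acc c hc
    rw [PySem.List.mem_pyRange_one] at hc
    exact pvB_row S1 S2 hpre c hc.1 hc.2 acc
  rw [PySem.List.foldl_congr_mem _ _ _ _ hstep, PySem.List.foldl_append_eq_flatMap, List.nil_append]
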